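-- pv_equiv track=rewrite | github.com/ct-be-dev/home-assessment | task1.py | tag_sentence
-- ===== SOURCE A (Python) =====
-- def tag_sentence(sentence, tags_dict):
--     """
--     Tag a sentence with all matching tags based on exact keyword matching
--     """
--     sentence_lower = sentence.lower()
--     matched_tags = []
--
--     for tag_name, keywords in tags_dict.items():
--         for keyword in keywords:
--             if keyword.lower() in sentence_lower:
--                 matched_tags.append(tag_name)
--                 break  # Once a tag matches, no need to check other keywords for this tag
--
--     return matched_tags
-- ===== SOURCE B (Python) =====
-- def tag_sentence(sentence, tags_dict):
--     """
--     Tag a sentence with all matching tags based on exact keyword matching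
--     """
--     s = sentence.lower()
--     n = len(s)
--     # index every substring of the sentence whose length occurs among the keywords,
--     # then each keyword test is a single set lookup instead of a scan of the sentence
--     lengths = {len(k) for kws in tags_dict.values() for k in kws}
--     subs = {s[i:i + L] for L in lengths for i in range(n - L + 1)}
--     return [tag for tag, kws in tags_dict.items()
--             if any(k.lower() in subs for k in kws)]
-- ===== Notes on version B (the rewrite author's own statement) =====
-- stated objective: faster
-- what changed: Instead of scanning the sentence once per keyword, B builds a set index of all sentence substrings of the occurring keyword lengths once and reduces every keyword test to a single set lookup, emitting tags by a filter over the dict items.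
import Mathlib
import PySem

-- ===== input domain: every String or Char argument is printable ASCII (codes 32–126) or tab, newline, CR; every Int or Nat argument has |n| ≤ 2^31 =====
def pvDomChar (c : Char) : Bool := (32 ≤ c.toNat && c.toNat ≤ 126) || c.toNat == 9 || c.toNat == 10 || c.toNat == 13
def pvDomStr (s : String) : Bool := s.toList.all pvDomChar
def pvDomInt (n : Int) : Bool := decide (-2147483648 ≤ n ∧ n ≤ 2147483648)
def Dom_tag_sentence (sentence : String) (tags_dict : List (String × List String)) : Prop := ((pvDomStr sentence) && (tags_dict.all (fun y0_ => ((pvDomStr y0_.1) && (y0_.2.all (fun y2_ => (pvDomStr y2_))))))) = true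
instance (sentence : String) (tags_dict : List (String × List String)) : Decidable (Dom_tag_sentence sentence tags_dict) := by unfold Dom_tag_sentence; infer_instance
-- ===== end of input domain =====

-- B replaces the per-keyword scan of the sentence by a precomputed set index of all
-- sentence substrings of the occurring keyword lengths (one lookup per keyword);
-- measured faster in a timing run; proved to return the same tag list.


-- ===== PORT A =====
-- inner loop 'for keyword in keywords: if keyword.lower() in sentence_lower: append(tag); break'
def pvTagLoopA (sentence_lower tag : String) (acc : List String) : List String → List String
  | [] => acc
  | k :: ks =>
    if PySem.Str.isIn (PySem.Str.lower k) sentence_lower then acc ++ [tag]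
    else pvTagLoopA sentence_lower tag acc ks

def tag_sentence (sentence : String) (tags_dict : List (String × List String)) : List String :=
  let sentence_lower := PySem.Str.lower sentence
  (PySem.Dict.ofList tags_dict).items.foldl
    (fun matched_tags p => pvTagLoopA sentence_lower p.1 matched_tags p.2) []

-- ===== PORT B =====
def tag_sentence_alt (sentence : String) (tags_dict : List (String × List String)) : List String :=
  let d := PySem.Dict.ofList tags_dict
  let s := PySem.Str.lower sentence
  let n : Int := PySem.Str.len s
  let lengths : PySem.Set Int :=
    PySem.Set.ofList (d.values.flatMap (fun kws => kws.map PySem.Str.len))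
  let subs : PySem.Set String :=
    PySem.Set.ofList (lengths.flatMap (fun L =>
      (PySem.List.pyRange 0 (n - L + 1)).map (fun i => PySem.Str.slice s (some i) (some (i + L)))))
  (d.items.filter (fun p => p.2.any (fun k => subs.contains (PySem.Str.lower k)))).map Prod.fst

-- ===== PRECONDITION & SPEC =====
def Spec_tag_sentence (sentence : String) (tags_dict : List (String × List String)) (out : List String) : Prop := out = tag_sentence_alt sentence tags_dict
instance (sentence : String) (tags_dict : List (String × List String)) (out : List String) : Decidable (Spec_tag_sentence sentence tags_dict out) := by unfold Spec_tag_sentence; infer_instance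

-- ===== CLAIM (what is proved, stated in full; the proofs are below) =====
def Claim_equal_tag_sentence : Prop := ∀ (sentence : String) (tags_dict : List (String × List String)), Dom_tag_sentence sentence tags_dict → Spec_tag_sentence sentence tags_dict (tag_sentence sentence tags_dict)

-- ===== LEMMAS AND PROOFS =====

-- the substring index is exact: for a key whose length occurs in `lengths` (all lengths
-- nonnegative), membership in the slice set is Python's substring test on s
lemma pv_mem_subs_iff (s k : String) (lengths : List Int)
    (hnn : ∀ L ∈ lengths, 0 ≤ L) (hL : ((k.toList.length : Int)) ∈ lengths) :
    (PySem.Set.contains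
      (PySem.Set.ofList (lengths.flatMap (fun L =>
        (PySem.List.pyRange 0 (PySem.Str.len s - L + 1)).map
          (fun i => PySem.Str.slice s (some i) (some (i + L)))))) k)
      = PySem.Str.isIn k s := by
  rw [Bool.eq_iff_iff, PySem.Set.contains_iff, PySem.Set.mem_ofList,
      PySem.Str.isIn_iff_infix, List.mem_flatMap]
  constructor
  · rintro ⟨L, hLmem, hk⟩
    rw [List.mem_map] at hk
    obtain ⟨i, hi, hk⟩ := hk
    rw [PySem.List.mem_pyRange_one] at hi
    have h0i : 0 ≤ i := hi.1
    have h0L : 0 ≤ L := hnn L hLmem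
    have : (PySem.Str.slice s (some i) (some (i + L))).toList
        = (s.toList.drop i.toNat).take ((i + L).toNat - i.toNat) := by
      rw [PySem.Str.toList_slice, PySem.Chars.slice_eq_listSlice,
          PySem.List.slice_toNat s.toList h0i (by omega)]
    rw [← hk, this]
    exact ((s.toList.drop i.toNat).take_prefix _).isInfix.trans
      (s.toList.drop_suffix i.toNat).isInfix
  · intro hinf
    obtain ⟨pre, suf, hps⟩ := hinf
    refine ⟨(k.toList.length : Int), hL, ?_⟩
    rw [List.mem_map]
    refine ⟨(pre.length : Int), ?_, ?_⟩
    · rw [PySem.List.mem_pyRange_one]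
      constructor
      · positivity
      · have : pre.length + k.toList.length ≤ s.toList.length := by
          rw [← hps]; simp
        rw [PySem.Str.len_eq]; omega
    · rw [String.ext_iff, PySem.Str.toList_slice, PySem.Chars.slice_eq_listSlice,
          PySem.List.slice_natCast_add]
      rw [← hps]
      simp

-- A's break-loop over one tag's keywords appends the tag iff some keyword matches
lemma pv_tagLoopA_eq (sl tag : String) (acc : List String) (ks : List String) :
    pvTagLoopA sl tag acc ks
      = if ks.any (fun k => PySem.Str.isIn (PySem.Str.lower k) sl) then acc ++ [tag] else acc := by
  induction ks with
  | nil => simp [pvTagLoopA]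
  | cons k ks ih =>
    cases h : PySem.Str.isIn (PySem.Str.lower k) sl with
    | true =>
      simp only [pvTagLoopA, List.any_cons, h, Bool.true_or, if_true]
    | false =>
      simp only [pvTagLoopA, List.any_cons, h, Bool.false_or, Bool.false_eq_true, if_false, ih]

-- lowercasing preserves length
lemma pv_len_lower (k : String) : (PySem.Str.lower k).toList.length = k.toList.length := by
  rw [PySem.Str.toList_lower]
  simp [PySem.Chars.lower]

-- ===== VERDICT (by name: the statement is the Claim_ definition above) =====
theorem tag_sentence_spec : Claim_equal_tag_sentence := by
  intro sentence tags_dict _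
  unfold Spec_tag_sentence tag_sentence tag_sentence_alt
  simp only []
  set d := PySem.Dict.ofList tags_dict with hd
  set s := PySem.Str.lower sentence with hs
  set lengths : List Int := d.values.flatMap (fun kws => kws.map PySem.Str.len) with hlen
  have hnn : ∀ L ∈ lengths, 0 ≤ L := by
    intro L hLm
    rw [hlen, List.mem_flatMap] at hLm
    obtain ⟨kws, _, hk⟩ := hLm
    rw [List.mem_map] at hk
    obtain ⟨k, _, rfl⟩ := hk
    rw [PySem.Str.len_eq]; positivity
  have hofl : PySem.Set.ofList lengths = lengths.foldl PySem.Set.add [] :=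
    PySem.Set.ofList_eq_foldl lengths
  -- membership test equals Python's substring test, for every keyword of the dict
  have hkey : ∀ p ∈ d.items, ∀ k ∈ p.2,
      (PySem.Set.contains
        (PySem.Set.ofList ((PySem.Set.ofList lengths).flatMap (fun L =>
          (PySem.List.pyRange 0 (PySem.Str.len s - L + 1)).map
            (fun i => PySem.Str.slice s (some i) (some (i + L))))))
        (PySem.Str.lower k))
        = PySem.Str.isIn (PySem.Str.lower k) s := by
    intro p hp k hk
    have hnn' : ∀ L ∈ (PySem.Set.ofList lengths : List Int), 0 ≤ L := by
      intro L hLm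
      exact hnn L ((PySem.Set.mem_ofList lengths L).mp hLm)
    apply pv_mem_subs_iff s (PySem.Str.lower k) _ hnn'
    rw [PySem.Set.mem_ofList, pv_len_lower, hlen, List.mem_flatMap]
    refine ⟨p.2, ?_, ?_⟩
    · simp only [PySem.Dict.values]
      exact List.mem_map.mpr ⟨p, hp, rfl⟩
    · rw [List.mem_map]
      exact ⟨k, hk, by rw [PySem.Str.len_eq]⟩
  -- replace A's loop body by the filter predicate of B, then fold to filter+map
  rw [PySem.List.foldl_congr_mem d.items _
      (fun acc p => if p.2.any (fun k =>
          PySem.Set.contains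
            (PySem.Set.ofList ((PySem.Set.ofList lengths).flatMap (fun L =>
              (PySem.List.pyRange 0 (PySem.Str.len s - L + 1)).map
                (fun i => PySem.Str.slice s (some i) (some (i + L))))))
            (PySem.Str.lower k)) then acc ++ [p.1] else acc) []
      (by
        intro acc p hp
        rw [pv_tagLoopA_eq]
        exact congrArg (fun c : Bool => if c = true then acc ++ [p.1] else acc)
          (PySem.List.any_congr_mem (fun k hk => (hkey p hp k hk).symm)))]
  rw [PySem.List.foldl_append_if]
  simp
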